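-- pv_equiv track=rewrite | github.com/neckless-was-taken/advent-of-code | year_2024/day 11/day 11.py | blinker3000
-- ===== SOURCE A (Python) =====
-- def blinker3000(rocks):
--     new_rocks = []
--     rocks = rocks[::-1]
--     for r in rocks:
--         if r == 0:
--             new_rocks.append(1)
--             continue
--         digit_count = len(str(r))
--         if digit_count % 2 == 0:
--             new_rocks.append(int(str(r)[0:int(digit_count/2)]))
--             new_rocks.append(int(str(r)[int(digit_count/2):]))
--             continue
--         new_rocks.append(r * 2024)
--         continue
--     return new_rocks
-- ===== SOURCE B (Python) =====
-- def blinker3000(rocks):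
--     # Two-pointer (slow/fast) middle split instead of len()//2 index slicing;
--     # output built in one forward pass by appending each rock's expansion in
--     # reversed element order, then reversed once at the end (no input reversal).
--     def halves(s):
--         left, rest, fast = [], s, s
--         while len(fast) >= 2:
--             left.append(rest[0])
--             rest = rest[1:]
--             fast = fast[2:]
--         return "".join(left), rest, fast
--     out = []
--     for r in rocks:
--         if r == 0:
--             out.append(1)
--         else:
--             left, rest, fast = halves(str(r))
--             if fast:
--                 out.append(r * 2024)
--             else:
--                 out.append(int(rest))
--                 out.append(int(left))
--     return out[::-1]
-- ===== Notes on version B (the rewrite author's own statement) =====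
-- stated objective: alternative
-- what changed: B finds each digit-string's midpoint and length parity with a slow/fast two-pointer walk (no len()//2 index arithmetic or index slicing) and produces the reversed-by-rock output by a forward pass that appends each expansion with its elements reversed, then one final out[::-1], instead of A's reverse-the-input-then-append loop.
import Mathlib
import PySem

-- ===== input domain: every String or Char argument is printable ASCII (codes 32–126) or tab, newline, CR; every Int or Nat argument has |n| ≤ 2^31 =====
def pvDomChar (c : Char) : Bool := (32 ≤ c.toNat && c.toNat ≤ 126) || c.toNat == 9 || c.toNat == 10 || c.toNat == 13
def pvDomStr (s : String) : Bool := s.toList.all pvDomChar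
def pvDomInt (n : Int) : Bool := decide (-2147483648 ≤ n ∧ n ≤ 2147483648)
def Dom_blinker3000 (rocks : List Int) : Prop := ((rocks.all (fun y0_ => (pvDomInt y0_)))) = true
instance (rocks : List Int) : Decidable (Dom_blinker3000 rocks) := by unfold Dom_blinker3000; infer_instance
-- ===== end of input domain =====

-- B replaces A's reverse-the-input-then-append loop and len//2 index slicing by a
-- slow/fast two-pointer middle split and a forward pass appending each expansion
-- element-reversed with one final [::-1] (alternative algorithm, same cost).


-- ===== PORT A =====
-- literal transliteration of A: reverse via rocks[::-1], then one fused foldl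
-- appending per-branch results; int(...) on a slice ported as PySem.Int.ofChars?,
-- total via .getD 0 only on inputs Pre_ excludes (where Python raises ValueError).
def blinker3000 (rocks : List Int) : List Int :=
  let rocksRev := (PySem.List.slice? rocks none none (-1)).getD []
  rocksRev.foldl (fun new_rocks r =>
    if r = 0 then
      new_rocks ++ [1]
    else
      let digit_count : Int := (PySem.Int.toChars r).length
      if PySem.Int.mod digit_count 2 = 0 then
        (new_rocks ++ [(PySem.Int.ofChars? (PySem.List.slice (PySem.Int.toChars r)
                          (some 0) (some (PySem.Int.floordiv digit_count 2)))).getD 0])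
          ++ [(PySem.Int.ofChars? (PySem.List.slice (PySem.Int.toChars r)
                          (some (PySem.Int.floordiv digit_count 2)) none)).getD 0]
      else
        new_rocks ++ [r * 2024]) []

-- ===== PORT B =====
-- B-side helper: the slow/fast two-pointer loop of halves(s); rest[0] ported as
-- PySem.List.pyGet? (getD unreachable: rest is never shorter than fast), rest[1:]
-- as List.tail, the `while len(fast) >= 2` guard + fast[2:] as the two-cons match.
def halvesGo (left : List Char) (rest fast : List Char) : List Char × List Char × List Char :=
  match fast with
  | _ :: _ :: f => halvesGo (left ++ [(PySem.List.pyGet? rest 0).getD ' ']) rest.tail f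
  | _ => (left, rest, fast)

-- forward pass appending each rock's expansion in reversed element order, then one
-- final out[::-1] (ported as slice?, like A's [::-1]); int("".join(left)) = ofChars? left.
def blinker3000_alt (rocks : List Int) : List Int :=
  let out := rocks.foldl (fun out r =>
    if r = 0 then out ++ [1]
    else
      match halvesGo [] (PySem.Int.toChars r) (PySem.Int.toChars r) with
      | (left, rest, fast) =>
        if fast ≠ [] then out ++ [r * 2024]
        else (out ++ [(PySem.Int.ofChars? rest).getD 0]) ++ [(PySem.Int.ofChars? left).getD 0]) []
  (PySem.List.slice? out none none (-1)).getD []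

-- ===== PRECONDITION & SPEC =====
-- Pre_ excludes exactly the inputs on which Python A (and B) raises ValueError: a one-digit
-- negative rock (-9 ≤ r ≤ -1) makes str(r) have length 2 and int(str(r)[0:1]) = int("-") fail.
def Pre_blinker3000 (rocks : List Int) : Prop := ∀ r ∈ rocks, 0 ≤ r ∨ r ≤ -10
instance (rocks : List Int) : Decidable (Pre_blinker3000 rocks) := by unfold Pre_blinker3000; infer_instance
def pvWitness_blinker3000 : List Int := [0, 17, 253000, -2024]

def Spec_blinker3000 (rocks : List Int) (out : List Int) : Prop := out = blinker3000_alt rocks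
instance (rocks : List Int) (out : List Int) : Decidable (Spec_blinker3000 rocks out) := by unfold Spec_blinker3000; infer_instance

-- ===== CLAIM (what is proved, stated in full; the proofs are below) =====
def Claim_equal_blinker3000 : Prop := ∀ (rocks : List Int), Dom_blinker3000 rocks → Pre_blinker3000 rocks → Spec_blinker3000 rocks (blinker3000 rocks)

-- ===== LEMMAS AND PROOFS =====

-- proof-side normal form of one rock's expansion (take/drop at the midpoint)
def expandRock (r : Int) : List Int :=
  if r = 0 then [1]
  else
    let s := PySem.Int.toChars r
    if s.length % 2 = 0 then
      [(PySem.Int.ofChars? (s.take (s.length / 2))).getD 0,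
       (PySem.Int.ofChars? (s.drop (s.length / 2))).getD 0]
    else [r * 2024]

-- the two-pointer loop computes take/drop at fast.length/2 and the parity leftover
lemma halvesGo_spec (left rest fast : List Char) (h : fast.length ≤ rest.length) :
    halvesGo left rest fast =
      (left ++ rest.take (fast.length / 2), rest.drop (fast.length / 2),
       fast.drop (2 * (fast.length / 2))) := by
  induction left, rest, fast using halvesGo.induct with
  | case1 left rest a b f ih =>
      obtain ⟨c, rest', rfl⟩ : ∃ c rest', rest = c :: rest' := by
        cases rest with
        | nil => simp at h
        | cons c r => exact ⟨c, r, rfl⟩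
      have hle : f.length ≤ rest'.length := by simp at h ⊢; omega
      rw [halvesGo]
      simp only [List.tail_cons] at ih ⊢
      rw [ih hle]
      have h2 : (f.length + 1 + 1) / 2 = f.length / 2 + 1 := by omega
      have h3 : 2 * (f.length / 2 + 1) = 2 * (f.length / 2) + 1 + 1 := by omega
      simp [PySem.List.pyGet?, PySem.List.pyIdx?, List.append_assoc]
      rw [h2, h3]
      exact ⟨rfl, rfl, rfl⟩
  | case2 t left rest hne =>
      cases t with
      | nil => simp [halvesGo]
      | cons a t' =>
          cases t' with
          | nil => simp [halvesGo]
          | cons b f => exact absurd rfl (hne a b f)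

-- A's fused loop body equals appending expandRock r.
lemma blinkStep_eq_expand (new_rocks : List Int) (r : Int) :
    (if r = 0 then
      new_rocks ++ [1]
    else
      let digit_count : Int := (PySem.Int.toChars r).length
      if PySem.Int.mod digit_count 2 = 0 then
        (new_rocks ++ [(PySem.Int.ofChars? (PySem.List.slice (PySem.Int.toChars r)
                          (some 0) (some (PySem.Int.floordiv digit_count 2)))).getD 0])
          ++ [(PySem.Int.ofChars? (PySem.List.slice (PySem.Int.toChars r)
                          (some (PySem.Int.floordiv digit_count 2)) none)).getD 0]
      else
        new_rocks ++ [r * 2024]) = new_rocks ++ expandRock r := by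
  unfold expandRock
  by_cases h0 : r = 0
  · simp [h0]
  · simp only [h0, if_false]
    rw [PySem.List.slice_zero_start,
        PySem.List.slice_to _ (by rw [PySem.Int.floordiv_eq_ediv_of_pos (by norm_num)]; omega),
        PySem.List.slice_from _ (by rw [PySem.Int.floordiv_eq_ediv_of_pos (by norm_num)]; omega)]
    have hdvd : ((2 : Int) ∣ ((PySem.Int.toChars r).length : Int))
        ↔ ((PySem.Int.toChars r).length % 2 = 0) := by omega
    have hf2 : ((((PySem.Int.toChars r).length : Int)) / 2).toNat
        = (PySem.Int.toChars r).length / 2 := by omega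
    by_cases he : (PySem.Int.toChars r).length % 2 = 0
    · simp [hdvd, he, hf2]
    · simp [hdvd, he]

-- B's loop body equals appending the reversed expandRock r.
lemma bStep_eq_expand (out : List Int) (r : Int) :
    (if r = 0 then out ++ [1]
    else
      match halvesGo [] (PySem.Int.toChars r) (PySem.Int.toChars r) with
      | (left, rest, fast) =>
        if fast ≠ [] then out ++ [r * 2024]
        else (out ++ [(PySem.Int.ofChars? rest).getD 0]) ++ [(PySem.Int.ofChars? left).getD 0])
      = out ++ (expandRock r).reverse := by
  unfold expandRock
  by_cases h0 : r = 0
  · simp [h0]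
  · simp only [h0, if_false]
    rw [halvesGo_spec _ _ _ le_rfl]
    by_cases he : (PySem.Int.toChars r).length % 2 = 0
    · have hnil : (PySem.Int.toChars r).drop
          (2 * ((PySem.Int.toChars r).length / 2)) = [] := by
        rw [List.eq_nil_iff_length_eq_zero, List.length_drop]; omega
      simp [hnil, he]
    · have hne : (PySem.Int.toChars r).drop
          (2 * ((PySem.Int.toChars r).length / 2)) ≠ [] := by
        intro hcon
        have := congrArg List.length hcon
        simp [List.length_drop] at this
        omega
      simp [hne, he]

-- A's loop over any list accumulates the concatenation of expansions.
lemma foldl_blink (xs : List Int) (acc : List Int) :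
    xs.foldl (fun new_rocks r =>
      if r = 0 then
        new_rocks ++ [1]
      else
        let digit_count : Int := (PySem.Int.toChars r).length
        if PySem.Int.mod digit_count 2 = 0 then
          (new_rocks ++ [(PySem.Int.ofChars? (PySem.List.slice (PySem.Int.toChars r)
                            (some 0) (some (PySem.Int.floordiv digit_count 2)))).getD 0])
            ++ [(PySem.Int.ofChars? (PySem.List.slice (PySem.Int.toChars r)
                            (some (PySem.Int.floordiv digit_count 2)) none)).getD 0]
        else
          new_rocks ++ [r * 2024]) acc = acc ++ xs.flatMap expandRock := by
  induction xs generalizing acc with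
  | nil => simp
  | cons x xs ih =>
      simp only [List.foldl_cons, List.flatMap_cons]
      rw [blinkStep_eq_expand, ih, List.append_assoc]

-- B's appending loop accumulates the reversed expansions in input order.
lemma foldl_append_rev (xs : List Int) (acc : List Int) :
    xs.foldl (fun out r =>
      if r = 0 then out ++ [1]
      else
        match halvesGo [] (PySem.Int.toChars r) (PySem.Int.toChars r) with
        | (left, rest, fast) =>
          if fast ≠ [] then out ++ [r * 2024]
          else (out ++ [(PySem.Int.ofChars? rest).getD 0]) ++ [(PySem.Int.ofChars? left).getD 0]) acc
      = acc ++ xs.flatMap (fun r => (expandRock r).reverse) := by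
  induction xs generalizing acc with
  | nil => simp
  | cons x xs ih =>
      simp only [List.foldl_cons, List.flatMap_cons]
      rw [bStep_eq_expand, ih, List.append_assoc]

-- ===== VERDICT (by name: the statement is the Claim_ definition above) =====
theorem blinker3000_spec : Claim_equal_blinker3000 := by
  intro rocks _ _
  unfold Spec_blinker3000 blinker3000 blinker3000_alt
  simp only [PySem.List.slice?_none_none_neg_one, Option.getD_some]
  rw [foldl_blink, foldl_append_rev]
  simp [List.reverse_flatMap, Function.comp_def]
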